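-- pv_equiv track=rewrite | github.com/jyajoo/Problem-Solving | Programmers/DFS&BFS/42840.py | solution
-- ===== SOURCE A (Python) =====
-- def solution(answers):
--     answer = []
--     scores = [0] * 3
--
--     num = [1, 2, 3, 4, 5]
--     num2 = [2, 1, 2, 3, 2, 4, 2, 5]
--     num3 = [3, 3, 1, 1, 2, 2, 4, 4, 5, 5]
--
--     for idx, j in enumerate(answers):
--         if j == num[idx % 5]:
--             scores[0] += 1
--         if j == num2[idx % 8]:
--             scores[1] += 1
--         if j == num3[idx % 10]:
--             scores[2] += 1
--
--     val = max(scores)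
--     for i, s in enumerate(scores):
--         if val == s:
--             answer.append(i + 1)
--
--     return answer
-- ===== SOURCE B (Python) =====
-- def solution(answers):
--     # Frequency table keyed by (index mod 40, answer): 40 = lcm of the three
--     # pattern lengths, so the residue mod 40 determines all three pattern cells.
--     counts = {}
--     for i, a in enumerate(answers):
--         key = (i % 40, a)
--         counts[key] = counts.get(key, 0) + 1
--     patterns = [[1, 2, 3, 4, 5],
--                 [2, 1, 2, 3, 2, 4, 2, 5],
--                 [3, 3, 1, 1, 2, 2, 4, 4, 5, 5]]
--     scores = [sum(c for (r, a), c in counts.items() if a == p[r % len(p)])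
--               for p in patterns]
--     m = max(scores)
--     return [k + 1 for k, s in enumerate(scores) if s == m]
-- ===== Notes on version B (the rewrite author's own statement) =====
-- stated objective: alternative
-- what changed: B replaces A's per-element comparison against three cyclic patterns by first building a frequency dictionary keyed by (index mod 40, answer) (40 = lcm of the pattern lengths) in one pass, then computing each supervisor's score as a sum over the distinct dictionary entries; A compares every element three times, B compares only distinct (residue, value) keys.
import Mathlib
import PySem

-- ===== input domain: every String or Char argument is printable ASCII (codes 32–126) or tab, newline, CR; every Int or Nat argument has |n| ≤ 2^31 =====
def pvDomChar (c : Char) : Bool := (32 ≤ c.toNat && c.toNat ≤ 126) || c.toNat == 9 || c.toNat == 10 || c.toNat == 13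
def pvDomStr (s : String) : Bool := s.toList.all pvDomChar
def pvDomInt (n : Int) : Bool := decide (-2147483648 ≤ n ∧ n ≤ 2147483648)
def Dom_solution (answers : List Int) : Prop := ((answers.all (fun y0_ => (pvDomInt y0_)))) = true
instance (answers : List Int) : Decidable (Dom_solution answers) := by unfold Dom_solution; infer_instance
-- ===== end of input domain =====

-- B replaces A's per-element triple comparison by a frequency dictionary keyed by
-- (index mod 40, answer) built in one pass, then sums counts over the distinct
-- entries per pattern (objective: alternative; same asymptotic cost).

-- ===== PORT A =====
-- A's single loop over enumerate(answers), updating all three scores at once.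
def solAGo (answers : List Int) (idx : Nat) (s : Int × Int × Int) : Int × Int × Int :=
  match answers with
  | [] => s
  | j :: rest =>
      let s0 := if j = ([1, 2, 3, 4, 5] : List Int).getD (idx % 5) 0 then s.1 + 1 else s.1
      let s1 := if j = ([2, 1, 2, 3, 2, 4, 2, 5] : List Int).getD (idx % 8) 0 then s.2.1 + 1 else s.2.1
      let s2 := if j = ([3, 3, 1, 1, 2, 2, 4, 4, 5, 5] : List Int).getD (idx % 10) 0 then s.2.2 + 1 else s.2.2
      solAGo rest (idx + 1) (s0, s1, s2)

def solution (answers : List Int) : List Int :=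
  let s := solAGo answers 0 (0, 0, 0)
  let val := max (max s.1 s.2.1) s.2.2
  (if val = s.1 then [1] else []) ++ (if val = s.2.1 then [2] else []) ++
    (if val = s.2.2 then [3] else [])

-- ===== PORT B =====
-- B: counts[(i % 40, a)] += 1 over enumerate(answers); per pattern, sum the counts
-- of the distinct (residue, value) entries that match; then max + comprehension.
def solution_alt (answers : List Int) : List Int :=
  let counts : PySem.Dict (Int × Int) Int :=
    (PySem.List.enumerate answers 0).foldl
      (fun d q =>
        let key := (PySem.Int.mod q.1 40, q.2)
        d.insert key (d.getD key 0 + 1))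
      PySem.Dict.empty
  let patterns : List (List Int) :=
    [[1, 2, 3, 4, 5], [2, 1, 2, 3, 2, 4, 2, 5], [3, 3, 1, 1, 2, 2, 4, 4, 5, 5]]
  let scores := patterns.map (fun p =>
    ((counts.items.filter
        (fun kc => kc.1.2 = PySem.List.pyGetD p (PySem.Int.mod kc.1.1 (p.length : Int)) 0)).map
      (fun kc => kc.2)).sum)
  -- max(scores): scores is a 3-element list, so max? is never none
  let m := (PySem.List.max? scores (fun s => s)).getD 0
  ((PySem.List.enumerate scores 0).filter (fun q => q.2 = m)).map (fun q => q.1 + 1)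

-- ===== PRECONDITION & SPEC =====
def Spec_solution (answers : List Int) (out : List Int) : Prop := out = solution_alt answers
instance (answers : List Int) (out : List Int) : Decidable (Spec_solution answers out) := by unfold Spec_solution; infer_instance

-- ===== CLAIM (what is proved, stated in full; the proofs are below) =====
def Claim_equal_solution : Prop := ∀ (answers : List Int), Dom_solution answers → Spec_solution answers (solution answers)

-- ===== LEMMAS AND PROOFS =====

-- proof-side helper: positional match count of one cyclic pattern
def scoreGo (p : List Int) (answers : List Int) (i : Nat) : Int :=
  match answers with
  | [] => 0
  | a :: rest => (if a = p.getD (i % p.length) 0 then 1 else 0) + scoreGo p rest (i + 1)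

theorem solAGo_eq (answers : List Int) : ∀ (idx : Nat) (s : Int × Int × Int),
    solAGo answers idx s =
      (s.1 + scoreGo [1, 2, 3, 4, 5] answers idx,
       s.2.1 + scoreGo [2, 1, 2, 3, 2, 4, 2, 5] answers idx,
       s.2.2 + scoreGo [3, 3, 1, 1, 2, 2, 4, 4, 5, 5] answers idx) := by
  induction answers with
  | nil => intro idx s; simp [solAGo, scoreGo]
  | cons j rest ih =>
      intro idx s
      simp only [solAGo, scoreGo, ih, List.length_cons, List.length_nil]
      split_ifs <;> simp <;> and_intros <;> ring

theorem sum_nodup_count {K : Type} [BEq K] [LawfulBEq K] [DecidableEq K] (pred : K → Bool) :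
    ∀ (D l : List K), D.Nodup → (∀ k ∈ D, pred k = true) →
      (∀ k ∈ l, pred k = true → k ∈ D) →
      (D.map (fun k => (l.count k : Int))).sum = ((l.countP pred : Nat) : Int) := by
  intro D
  induction D with
  | nil =>
      intro l _ _ hl
      have : l.countP pred = 0 := by
        rw [List.countP_eq_zero]
        intro k hk hpk
        exact absurd (hl k hk hpk) (List.not_mem_nil)
      simp [this]
  | cons k D' ih =>
      intro l hnd hDp hl
      have hk : pred k = true := hDp k (List.mem_cons_self)
      have hknd : k ∉ D' := (List.nodup_cons.mp hnd).1
      have hnd' : D'.Nodup := (List.nodup_cons.mp hnd).2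
      set l' := l.filter (fun x => decide (x ≠ k)) with hl'
      have hcount : ∀ j ∈ D', l'.count j = l.count j := by
        intro j hj
        have hjk : j ≠ k := fun he => hknd (he ▸ hj)
        rw [hl', List.count_filter]
        simp [hjk]
      have hmap : (D'.map (fun j => (l'.count j : Int))).sum
          = (D'.map (fun j => (l.count j : Int))).sum := by
        apply congrArg
        apply List.map_congr_left
        intro j hj; rw [hcount j hj]
      have ihl : (D'.map (fun j => (l'.count j : Int))).sum = ((l'.countP pred : Nat) : Int) := by
        apply ih l' hnd' (fun j hj => hDp j (List.mem_cons_of_mem _ hj))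
        intro x hx hpx
        have hxl : x ∈ l := List.mem_of_mem_filter hx
        have hxk : x ≠ k := by
          have := List.of_mem_filter hx
          simpa using this
        rcases List.mem_cons.mp (hl x hxl hpx) with h | h
        · exact absurd h hxk
        · exact h
      have hgen : ∀ (m : List K), m.length = m.count k + (m.filter (fun x => decide (x ≠ k))).length := by
        intro m
        have hh := List.length_eq_countP_add_countP (p := fun x => x == k) (l := m)
        rw [hh]
        simp [List.count, List.countP_eq_length_filter]
      have hsplit : l.countP pred = l.count k + l'.countP pred := by
        have h1 : (l.filter pred).count k = l.count k := by
          rw [List.count_filter]; simp [hk]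
        have h2 : l'.countP pred = ((l.filter pred).filter (fun x => decide (x ≠ k))).length := by
          rw [hl', List.countP_eq_length_filter, List.filter_comm]
        rw [List.countP_eq_length_filter, hgen (l.filter pred), h1, h2]
      rw [List.map_cons, List.sum_cons, hmap.symm, ihl, hsplit]
      push_cast; ring

theorem key_pred_eq (p : List Int) (hd : p.length ∣ 40)
    (idx : Nat) (a : Int) :
    (a = PySem.List.pyGetD p (PySem.Int.mod (PySem.Int.mod (idx : Int) 40) (p.length : Int)) 0)
      ↔ (a = p.getD (idx % p.length) 0) := by
  have h40 : (40 : Int) = ((40 : Nat) : Int) := by norm_num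
  rw [h40, PySem.Int.mod_natCast, PySem.Int.mod_natCast, Nat.mod_mod_of_dvd idx hd,
      PySem.List.pyGetD_natCast]

theorem scoreGo_eq_countP (p : List Int) (hd : p.length ∣ 40) :
    ∀ (answers : List Int) (idx : Nat),
      scoreGo p answers idx =
        (((PySem.List.enumerate answers (idx : Int)).countP
            (fun q => decide (q.2 = PySem.List.pyGetD p
              (PySem.Int.mod (PySem.Int.mod q.1 40) (p.length : Int)) 0)) : Nat) : Int) := by
  intro answers
  induction answers with
  | nil => intro idx; simp [scoreGo, PySem.List.enumerate_nil]
  | cons a rest ih =>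
      intro idx
      have hcast : ((idx : Int) + 1) = (((idx + 1 : Nat)) : Int) := by push_cast; ring
      rw [PySem.List.enumerate_cons, List.countP_cons]
      simp only [scoreGo]
      rw [hcast, ih (idx + 1)]
      have hdec : (decide (a = PySem.List.pyGetD p
          (PySem.Int.mod (PySem.Int.mod ((idx : Nat) : Int) 40) (p.length : Int)) 0)) =
          decide (a = p.getD (idx % p.length) 0) :=
        decide_eq_decide.mpr (key_pred_eq p hd idx a)
      simp only [hdec]
      by_cases h : a = p.getD (idx % p.length) 0
      · rw [decide_eq_true h]; simp only [List.getD_eq_getElem?_getD] at h; simp [h]; omega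
      · rw [decide_eq_false h]; simp only [List.getD_eq_getElem?_getD] at h; simp [h]

theorem scoreB_eq (answers : List Int) (p : List Int) :
    ((((PySem.List.enumerate answers 0).foldl
        (fun d q =>
          let key := (PySem.Int.mod q.1 40, q.2)
          d.insert key (d.getD key 0 + 1))
        (PySem.Dict.empty : PySem.Dict (Int × Int) Int)).items.filter
          (fun kc => kc.1.2 = PySem.List.pyGetD p (PySem.Int.mod kc.1.1 (p.length : Int)) 0)).map
        (fun kc => kc.2)).sum =
      (((PySem.List.enumerate answers 0).countP
          (fun q => decide (q.2 = PySem.List.pyGetD p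
            (PySem.Int.mod (PySem.Int.mod q.1 40) (p.length : Int)) 0)) : Nat) : Int) := by
  set key : Int × Int → Int × Int := fun q => (PySem.Int.mod q.1 40, q.2) with hkey
  set ks : List (Int × Int) := (PySem.List.enumerate answers 0).map key with hks
  have hfold : ((PySem.List.enumerate answers 0).foldl
      (fun d q =>
        let key := (PySem.Int.mod q.1 40, q.2)
        d.insert key (d.getD key 0 + 1))
      (PySem.Dict.empty : PySem.Dict (Int × Int) Int)) = PySem.Dict.counter ks := by
    rw [hks, ← PySem.Dict.foldl_insert_getD_add_one_eq_counter, List.foldl_map]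
  rw [hfold, PySem.Dict.items_counter]
  rw [List.filter_map, List.map_map]
  set predK : Int × Int → Bool :=
    fun k => decide (k.2 = PySem.List.pyGetD p (PySem.Int.mod k.1 (p.length : Int)) 0) with hpredK
  have hfc : ((fun kc : (Int × Int) × Int =>
        decide (kc.1.2 = PySem.List.pyGetD p (PySem.Int.mod kc.1.1 (p.length : Int)) 0)) ∘
      (fun k : Int × Int => (k, (ks.count k : Int)))) = predK := by
    funext k; simp [hpredK]
  have hvc : ((fun kc : (Int × Int) × Int => kc.2) ∘
      (fun k : Int × Int => (k, (ks.count k : Int)))) = fun k => (ks.count k : Int) := by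
    funext k; rfl
  rw [hfc, hvc]
  have hsum := sum_nodup_count predK ((PySem.Set.ofList ks).filter predK) ks
    ((PySem.Set.nodup_ofList ks).filter _)
    (fun k hk => (List.mem_filter.mp hk).2)
    (fun k hk hp => List.mem_filter.mpr ⟨(PySem.Set.mem_ofList ks k).mpr hk, hp⟩)
  rw [hsum]
  rw [hks, List.countP_map]
  refine congrArg _ ?_
  apply List.countP_congr
  intro q _
  simp [hpredK, hkey]

theorem tailGen (M a b c : Int) :
    (if M = a then ([1] : List Int) else []) ++ (if M = b then [2] else []) ++
      (if M = c then [3] else []) =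
    (([((0 : Int), a), (1, b), (2, c)].filter (fun q => q.2 = M)).map
      (fun q => q.1 + 1)) := by
  simp only [List.filter_cons, List.filter_nil, decide_eq_true_eq]
  simp only [show ∀ x : Int, (x = M) = (M = x) from fun x => propext eq_comm]
  split_ifs with h1 h2 h3 h3 h2 h3 h3 <;> simp

theorem tailEq (a b c : Int) :
    (if max (max a b) c = a then ([1] : List Int) else []) ++
      (if max (max a b) c = b then [2] else []) ++
      (if max (max a b) c = c then [3] else []) =
    ((PySem.List.enumerate ([a, b, c] : List Int) 0).filter
        (fun q => q.2 = (PySem.List.max? [a, b, c] (fun s => s)).getD 0)).map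
      (fun q => q.1 + 1) := by
  have hm : (PySem.List.max? ([a, b, c] : List Int) (fun s => s)).getD 0 = max (max a b) c := by
    rw [PySem.List.max?_id_cons]
    simp [List.foldl]
  rw [hm]
  simp only [PySem.List.enumerate_cons, PySem.List.enumerate_nil]
  have := tailGen (max (max a b) c) a b c
  convert this using 2

-- ===== VERDICT (by name: the statement is the Claim_ definition above) =====
theorem solution_spec : Claim_equal_solution := by
  intro answers _
  show solution answers = solution_alt answers
  simp only [solution, solution_alt, solAGo_eq, zero_add]
  rw [scoreGo_eq_countP [1,2,3,4,5] (by decide),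
      scoreGo_eq_countP [2,1,2,3,2,4,2,5] (by decide),
      scoreGo_eq_countP [3,3,1,1,2,2,4,4,5,5] (by decide)]
  simp only [List.map_cons, List.map_nil, scoreB_eq]
  exact tailEq _ _ _
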